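-- pv_equiv track=rewrite | github.com/vovs03/python_ex | issues/63/convert_negatives_nums_use_one_list.py | transform_negative_and_group
-- ===== SOURCE A (Python) =====
-- def transform_negative_and_group(list_num):
-- 	"""
-- 	# 	Для прохода по всему списка перебираем элементы по индексу,
-- 	# 	начиная с нулевого индекса
-- 	"""
-- 	index = 0
--
-- 	# Условием перебора будет выполняемый цикл
-- 	# пока индекс меньше длины (элементов списка)
-- 	while index < len(list_num):
--
-- 		# Проверяем число из списка если оно положительное,
-- 		# т.е. больше или равно нулю
-- 		if list_num[index] >= 0:
-- 			# Удаляем его из списка (по индексу)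
-- 			list_num.pop(index)
-- 		else:
-- 			# Иначе это число преобразуем в положительное
-- 			# https://all-python.ru/osnovy/modul-chisla.html
-- 			list_num[index] = abs(list_num[index])
-- 			# Увеличиваем счётчик индексов списка
-- 			index += 1
-- 	# Функция возвращает список отобранных отрицательных чисел,
-- 	# с последующим преобразованием в положительные
-- 	return list_num
-- ===== SOURCE B (Python) =====
-- def transform_negative_and_group(list_num):
--     # In-place two-pointer compaction: one O(n) pass with a write index,
--     # then truncate the tail; returns the same (mutated) list object.
--     w = 0
--     for r in range(len(list_num)):
--         if list_num[r] < 0: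
--             list_num[w] = abs(list_num[r])
--             w += 1
--     del list_num[w:]
--     return list_num
-- ===== Notes on version B (the rewrite author's own statement) =====
-- stated objective: faster
-- what changed: Replaces the while-loop that pops every non-negative element (each pop shifting the tail) by a single read/write two-pointer compaction pass followed by one tail truncation.
import Mathlib
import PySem

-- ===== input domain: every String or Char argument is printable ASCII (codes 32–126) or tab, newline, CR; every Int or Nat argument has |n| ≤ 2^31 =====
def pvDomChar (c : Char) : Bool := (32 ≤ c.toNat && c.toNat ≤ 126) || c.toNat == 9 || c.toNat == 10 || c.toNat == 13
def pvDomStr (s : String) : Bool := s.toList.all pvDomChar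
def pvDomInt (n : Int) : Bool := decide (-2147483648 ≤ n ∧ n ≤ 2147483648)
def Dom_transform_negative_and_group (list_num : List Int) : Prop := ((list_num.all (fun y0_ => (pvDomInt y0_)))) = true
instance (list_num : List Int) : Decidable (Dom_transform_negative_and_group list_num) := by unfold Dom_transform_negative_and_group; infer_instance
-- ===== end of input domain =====

-- B replaces A's pop-per-element while loop (quadratic) by one write-pointer compaction
-- pass plus a single tail truncation (linear). Both Pythons mutate list_num in place and
-- end with identical list contents; the equivalence proved here is about the return value.

-- ===== PORT A =====
-- A's while loop: pop at index if non-negative, else overwrite with abs and advance.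
def transformNegLoopA (l : List Int) (index : Nat) : List Int :=
  if h : index < l.length then
    if l[index] ≥ 0 then
      transformNegLoopA (l.eraseIdx index) index
    else
      transformNegLoopA (l.set index |l[index]|) (index + 1)
  else l
termination_by l.length - index
decreasing_by
  · simp [List.length_eraseIdx, h]; omega
  · simp; omega

def transform_negative_and_group (list_num : List Int) : List Int :=
  transformNegLoopA list_num 0

-- ===== PORT B =====
-- B's for-loop over range(len): state is (list, write index); then del list[w:] = take w.
def transformNegStepB (st : List Int × Nat) (r : Nat) : List Int × Nat :=
  if st.1.getD r 0 < 0 then (st.1.set st.2 |st.1.getD r 0|, st.2 + 1) else st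

def transform_negative_and_group_alt (list_num : List Int) : List Int :=
  let st := (List.range list_num.length).foldl transformNegStepB (list_num, 0)
  st.1.take st.2

-- ===== PRECONDITION & SPEC =====
def Spec_transform_negative_and_group (list_num : List Int) (out : List Int) : Prop := out = transform_negative_and_group_alt list_num
instance (list_num : List Int) (out : List Int) : Decidable (Spec_transform_negative_and_group list_num out) := by unfold Spec_transform_negative_and_group; infer_instance

-- ===== CLAIM (what is proved, stated in full; the proofs are below) =====
def Claim_equal_transform_negative_and_group : Prop := ∀ (list_num : List Int), Dom_transform_negative_and_group list_num → Spec_transform_negative_and_group list_num (transform_negative_and_group list_num)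

-- ===== LEMMAS AND PROOFS =====

-- canonical value: the negatives, made positive, in order
def negAbs (l : List Int) : List Int := (l.filter (fun x => x < 0)).map (fun x => |x|)

theorem negAbs_nil : negAbs [] = [] := rfl

theorem negAbs_cons (x : Int) (l : List Int) :
    negAbs (x :: l) = if x < 0 then |x| :: negAbs l else negAbs l := by
  by_cases h : x < 0 <;> simp [negAbs, List.filter, h]

theorem negAbs_append (l₁ l₂ : List Int) : negAbs (l₁ ++ l₂) = negAbs l₁ ++ negAbs l₂ := by
  simp [negAbs]

-- A's loop leaves the first `i` elements alone and turns the tail into negAbs of it.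
theorem transformNegLoopA_eq (n : Nat) : ∀ (l : List Int) (i : Nat), l.length - i ≤ n →
    transformNegLoopA l i = l.take i ++ negAbs (l.drop i) := by
  induction n with
  | zero =>
    intro l i hl
    rw [transformNegLoopA, dif_neg (by omega)]
    rw [List.take_of_length_le (by omega), List.drop_of_length_le (by omega), negAbs_nil,
      List.append_nil]
  | succ n ih =>
    intro l i hl
    rw [transformNegLoopA]
    by_cases h : i < l.length
    · have hdrop : l.drop i = l[i] :: l.drop (i + 1) := (List.getElem_cons_drop h).symm
      simp only [h, dif_pos]
      by_cases hp : l[i] ≥ 0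
      · -- pop branch: recurse, list one shorter
        rw [if_pos hp]
        have hlen : (l.eraseIdx i).length - i ≤ n := by
          simp [List.length_eraseIdx, h]; omega
        rw [ih _ _ hlen]
        rw [List.eraseIdx_eq_take_drop_succ]
        have h1 : (l.take i ++ l.drop (i + 1)).take i = l.take i := by
          rw [List.take_append]
          simp [List.length_take, Nat.le_of_lt h]
        have h2 : (l.take i ++ l.drop (i + 1)).drop i = l.drop (i + 1) := by
          rw [List.drop_append]
          simp [List.length_take_of_le (Nat.le_of_lt h), List.drop_of_length_le]
        rw [h1, h2, hdrop, negAbs_cons, if_neg (by omega)]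
      · -- overwrite+advance branch
        rw [if_neg hp]
        have hx : l[i] < 0 := by omega
        rw [ih _ _ (by simp; omega)]
        have hset : l.set i |l[i]| = l.take i ++ |l[i]| :: l.drop (i + 1) := by
          rw [List.set_eq_take_append_cons_drop, if_pos h]
        have hi : (l.take i).length = i := List.length_take_of_le (Nat.le_of_lt h)
        have h3 : (l.set i |l[i]|).take (i + 1) = l.take i ++ [|l[i]|] := by
          rw [hset, List.take_append, hi, Nat.add_sub_cancel_left,
            List.take_of_length_le (by rw [hi]; omega)]
          simp
        have h4 : (l.set i |l[i]|).drop (i + 1) = l.drop (i + 1) := by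
          rw [hset, List.drop_append, hi, Nat.add_sub_cancel_left,
            List.drop_of_length_le (by rw [hi]; omega)]
          simp
        rw [h3, h4, hdrop, negAbs_cons, if_pos hx]
        simp [List.append_assoc]
    · simp only [h, dif_neg, not_false_iff]
      rw [List.take_of_length_le (by omega), List.drop_of_length_le (by omega), negAbs_nil,
        List.append_nil]

-- B's fold invariant: after processing range r, the list is negAbs of the read prefix
-- followed by the original tail from the write pointer on.
theorem transformNegFoldB_inv (l : List Int) : ∀ (r : Nat), r ≤ l.length →
    (List.range r).foldl transformNegStepB (l, 0) =
      (negAbs (l.take r) ++ l.drop (negAbs (l.take r)).length, (negAbs (l.take r)).length) ∧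
      (negAbs (l.take r)).length ≤ r := by
  intro r
  induction r with
  | zero => intro _; simp [negAbs]
  | succ r ih =>
    intro hr
    obtain ⟨hst, hw⟩ := ih (Nat.le_of_succ_le hr)
    have hrlt : r < l.length := hr
    set w := (negAbs (l.take r)).length with hwdef
    rw [List.range_succ, List.foldl_append, hst]
    simp only [List.foldl_cons, List.foldl_nil]
    have hread : (negAbs (l.take r) ++ l.drop w).getD r 0 = l[r] := by
      rw [List.getD, List.getElem?_append_right (by omega)]
      rw [List.getElem?_drop]
      have : w + (r - w) = r := by omega
      rw [this]
      simp [List.getElem?_eq_getElem hrlt]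
    have htake : l.take (r + 1) = l.take r ++ [l[r]] := by
      rw [List.take_add_one]
      simp [List.getElem?_eq_getElem hrlt]
    unfold transformNegStepB
    simp only [hread]
    by_cases hneg : l[r] < 0
    · rw [if_pos hneg]
      have hdropw : l.drop w = l[w]'(by omega) :: l.drop (w + 1) :=
        (List.getElem_cons_drop (by omega)).symm
      constructor
      · rw [htake, negAbs_append, negAbs_cons, if_pos hneg, negAbs_nil]
        simp only [List.length_append, List.length_cons, List.length_nil]
        rw [hdropw]
        rw [List.set_append_right _ _ (by simp [hwdef])]
        simp only [hwdef, Nat.sub_self, List.set_cons_zero]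
        simp [List.append_assoc]
      · rw [htake, negAbs_append, negAbs_cons, if_pos hneg, negAbs_nil]
        simp only [List.length_append, List.length_cons, List.length_nil]
        omega
    · rw [if_neg hneg]
      rw [htake, negAbs_append, negAbs_cons, if_neg hneg, negAbs_nil, List.append_nil]
      exact ⟨rfl, by omega⟩

theorem transform_negative_and_group_alt_eq (l : List Int) :
    transform_negative_and_group_alt l = negAbs l := by
  unfold transform_negative_and_group_alt
  obtain ⟨hst, _⟩ := transformNegFoldB_inv l l.length (Nat.le_refl _)
  rw [hst]
  simp

theorem transform_negative_and_group_eq (l : List Int) :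
    transform_negative_and_group l = negAbs l := by
  unfold transform_negative_and_group
  rw [transformNegLoopA_eq l.length l 0 (by omega)]
  simp

-- ===== VERDICT (by name: the statement is the Claim_ definition above) =====
theorem transform_negative_and_group_spec : Claim_equal_transform_negative_and_group := by
  intro l _
  unfold Spec_transform_negative_and_group
  rw [transform_negative_and_group_eq, transform_negative_and_group_alt_eq]
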